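-- pv_equiv track=rewrite | github.com/memogamd21/Chi-Squared-Test | The course project .py | minor3
-- ===== SOURCE A (Python) =====
-- def det2 (A):
--     return A[0][0] * A[1][1] - A[1][0] * A[0][1]
--
-- def minor3(A, i, j):
--     m = []
--     for ii in range(3):
--         if ii != i:
--             row = []
--             for jj in range(3):
--                 if jj != j:
--                     row.append(A[ii][jj])
--             m.append(row)
--     return det2(m)
-- ===== SOURCE B (Python) =====
-- def minor3(A, i, j):
--     # table form: the two surviving row/column indices of a 3x3 after deleting row i, col j
--     r0 = 1 if i == 0 else 0
--     r1 = 2 if i == 0 or i == 1 else 1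
--     c0 = 1 if j == 0 else 0
--     c1 = 2 if j == 0 or j == 1 else 1
--     return A[r0][c0] * A[r1][c1] - A[r1][c0] * A[r0][c1]
-- ===== Notes on version B (the rewrite author's own statement) =====
-- stated objective: simpler
-- what changed: B replaces the submatrix-building double loop plus det2 helper with a direct index table (the two surviving row/column indices) and one arithmetic expression over the original matrix.
import Mathlib
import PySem

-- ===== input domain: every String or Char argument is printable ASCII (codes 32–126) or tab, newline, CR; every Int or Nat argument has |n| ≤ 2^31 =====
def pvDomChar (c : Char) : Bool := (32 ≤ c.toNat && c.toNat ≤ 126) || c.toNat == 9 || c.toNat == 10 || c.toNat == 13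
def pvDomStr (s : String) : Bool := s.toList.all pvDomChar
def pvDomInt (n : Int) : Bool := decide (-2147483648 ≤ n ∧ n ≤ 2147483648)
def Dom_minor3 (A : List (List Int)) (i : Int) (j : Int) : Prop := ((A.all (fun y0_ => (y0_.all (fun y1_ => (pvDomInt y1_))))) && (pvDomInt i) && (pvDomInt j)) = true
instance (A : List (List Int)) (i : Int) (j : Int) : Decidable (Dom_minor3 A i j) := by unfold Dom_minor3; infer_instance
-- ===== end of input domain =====

-- B replaces A's submatrix-building double loop + det2 with a direct surviving-index table and one arithmetic expression (objective: simpler).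


-- ===== PORT A =====
-- det2 reads m[0][0], m[1][1], m[1][0], m[0][1]; pyGetD defaults are only reached
-- outside Pre_minor3 (where the Python raises IndexError).
def det2 (m : List (List Int)) : Int :=
  (PySem.List.pyGetD (PySem.List.pyGetD m 0 []) 0 0) * (PySem.List.pyGetD (PySem.List.pyGetD m 1 []) 1 0)
    - (PySem.List.pyGetD (PySem.List.pyGetD m 1 []) 0 0) * (PySem.List.pyGetD (PySem.List.pyGetD m 0 []) 1 0)

def minor3 (A : List (List Int)) (i : Int) (j : Int) : Int :=
  let m : List (List Int) :=
    (PySem.List.pyRange 0 3 1).foldl (fun m ii =>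
      if ii ≠ i then
        let row : List Int :=
          (PySem.List.pyRange 0 3 1).foldl (fun row jj =>
            if jj ≠ j then row ++ [PySem.List.pyGetD (PySem.List.pyGetD A ii []) jj 0] else row) []
        m ++ [row]
      else m) []
  det2 m

-- ===== PORT B =====
def minor3_alt (A : List (List Int)) (i : Int) (j : Int) : Int :=
  let r0 : Int := if i = 0 then 1 else 0
  let r1 : Int := if i = 0 ∨ i = 1 then 2 else 1
  let c0 : Int := if j = 0 then 1 else 0
  let c1 : Int := if j = 0 ∨ j = 1 then 2 else 1
  let g : Int → Int → Int := fun r c => PySem.List.pyGetD (PySem.List.pyGetD A r []) c 0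
  g r0 c0 * g r1 c1 - g r1 c0 * g r0 c1

-- ===== PRECONDITION & SPEC =====
-- Pre_ excludes exactly the inputs where Python A raises IndexError: some accessed
-- A[ii][jj] (ii,jj in 0..2, ii ≠ i, jj ≠ j) is missing.
def Pre_minor3 (A : List (List Int)) (i : Int) (j : Int) : Prop :=
  ∀ ii ∈ ([0, 1, 2] : List Int), ii ≠ i →
    ii.toNat < A.length ∧
      ∀ jj ∈ ([0, 1, 2] : List Int), jj ≠ j → jj.toNat < (A.getD ii.toNat []).length
instance (A : List (List Int)) (i : Int) (j : Int) : Decidable (Pre_minor3 A i j) := by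
  unfold Pre_minor3; infer_instance

def pvWitness_minor3 : List (List Int) × Int × Int := ([[1, 2, 3], [4, 5, 6], [7, 8, 9]], 1, 2)

def Spec_minor3 (A : List (List Int)) (i : Int) (j : Int) (out : Int) : Prop := out = minor3_alt A i j
instance (A : List (List Int)) (i : Int) (j : Int) (out : Int) : Decidable (Spec_minor3 A i j out) := by unfold Spec_minor3; infer_instance

-- ===== CLAIM (what is proved, stated in full; the proofs are below) =====
def Claim_equal_minor3 : Prop := ∀ (A : List (List Int)) (i : Int) (j : Int), Dom_minor3 A i j → Pre_minor3 A i j → Spec_minor3 A i j (minor3 A i j)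

-- ===== LEMMAS AND PROOFS =====

lemma foldl_range3 {B : Type} (f : B → Int → B) (b : B) :
    (PySem.List.pyRange 0 3 1).foldl f b = f (f (f b 0) 1) 2 := by
  simp [PySem.List.pyRange, List.range_succ]

-- ===== VERDICT (by name: the statement is the Claim_ definition above) =====
set_option maxHeartbeats 2000000 in
theorem minor3_spec : Claim_equal_minor3 := by
  intro A i j _ _
  simp only [Spec_minor3, minor3, minor3_alt, det2, foldl_range3]
  by_cases hi0 : i = 0 <;> by_cases hi1 : i = 1 <;> by_cases hi2 : i = 2 <;>
    by_cases hj0 : j = 0 <;> by_cases hj1 : j = 1 <;> by_cases hj2 : j = 2 <;>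
    simp_all [eq_comm,
      PySem.List.pyGetD]
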